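-- pv_equiv track=rewrite | github.com/aryalsushant/dsa | tip101-3a/3 - strings/session2/longest_uniform_substring.py | longest_uniform_substring
-- ===== SOURCE A (Python) =====
-- def longest_uniform_substring(s):
--     hash = {}
--     for char in s:
--         if char in hash:
--             hash[char]+=1
--         else:
--             hash[char] =1
--     return max(hash.values())
-- ===== SOURCE B (Python) =====
-- def longest_uniform_substring(s):
--     best = 0
--     run = 0
--     prev = None
--     for c in sorted(s):
--         run = run + 1 if c == prev else 1
--         if run > best:
--             best = run
--         prev = c
--     return best
-- ===== Notes on version B (the rewrite author's own statement) =====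
-- stated objective: alternative
-- what changed: Replaces the frequency-dict build + max over values with sort-then-scan: sort the characters so equal ones become contiguous and return the length of the longest uniform run, found in one linear scan with a run counter.
import Mathlib
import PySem

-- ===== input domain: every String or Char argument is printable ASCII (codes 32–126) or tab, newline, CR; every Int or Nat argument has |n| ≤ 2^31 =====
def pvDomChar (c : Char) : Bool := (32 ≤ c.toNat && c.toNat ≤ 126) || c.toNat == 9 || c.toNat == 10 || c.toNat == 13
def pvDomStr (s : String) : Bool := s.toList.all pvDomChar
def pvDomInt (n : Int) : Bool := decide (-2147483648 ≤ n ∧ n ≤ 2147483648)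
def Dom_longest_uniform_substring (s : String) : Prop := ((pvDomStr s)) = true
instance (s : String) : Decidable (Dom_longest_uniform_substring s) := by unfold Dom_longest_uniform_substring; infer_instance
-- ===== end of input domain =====

-- B replaces A's frequency-dict loop with sort-then-scan: sort the characters and take the longest run of equal adjacent ones (alternative algorithm of similar cost; the empty string, on which A raises ValueError, is excluded by Pre_).


-- ===== PORT A =====
-- for char in s: if char in hash: hash[char] += 1 else: hash[char] = 1; return max(hash.values())
def longest_uniform_substring (s : String) : Int :=
  let hash : PySem.Dict Char Int :=
    s.toList.foldl (fun d c =>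
      if d.contains c then d.insert c (d.getD c 0 + 1) else d.insert c 1)
      PySem.Dict.empty
  (PySem.List.max? hash.values (fun v => v)).getD 0  -- max([]) raises ValueError: excluded by Pre_

-- ===== PORT B =====
-- best = run = 0; prev = None; for c in sorted(s): run = run+1 if c == prev else 1; if run > best: best = run; prev = c; return best
def longest_uniform_substring_alt (s : String) : Int :=
  ((PySem.List.sorted s.toList (fun c => c) false).foldl
    (fun (st : Int × Int × Option Char) c =>
      let run : Int := if some c = st.2.2 then st.2.1 + 1 else 1
      let best : Int := if run > st.1 then run else st.1
      (best, run, some c))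
    ((0 : Int), (0 : Int), (none : Option Char))).1

-- ===== PRECONDITION & SPEC =====
-- Pre_ excludes only the empty string, on which A raises ValueError (max() of an empty dict-values view).
def Pre_longest_uniform_substring (s : String) : Prop := s ≠ ""
instance (s : String) : Decidable (Pre_longest_uniform_substring s) := by unfold Pre_longest_uniform_substring; infer_instance
def pvWitness_longest_uniform_substring : String := "aab"

def Spec_longest_uniform_substring (s : String) (out : Int) : Prop := out = longest_uniform_substring_alt s
instance (s : String) (out : Int) : Decidable (Spec_longest_uniform_substring s out) := by unfold Spec_longest_uniform_substring; infer_instance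

-- ===== CLAIM (what is proved, stated in full; the proofs are below) =====
def Claim_equal_longest_uniform_substring : Prop := ∀ (s : String), Dom_longest_uniform_substring s → Pre_longest_uniform_substring s → Spec_longest_uniform_substring s (longest_uniform_substring s)

-- ===== LEMMAS AND PROOFS =====

-- A's dict loop IS Counter(s)
lemma foldl_branch_eq_counter (l : List Char) :
    l.foldl (fun d c =>
      if d.contains c then d.insert c (d.getD c 0 + 1) else d.insert c 1)
      PySem.Dict.empty = PySem.Dict.counter l := by
  rw [← PySem.Dict.foldl_insert_getD_add_one_eq_counter]
  apply PySem.List.foldl_congr_mem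
  intro d c _
  by_cases h : d.contains c
  · simp [h]
  · rw [if_neg (by simp [h]), PySem.Dict.getD_of_not_contains d 0 (by simpa using h)]; norm_num

-- the best value produced by B's scan, as a recursion on the remaining characters
def mrun : Option Char → Int → List Char → Int
  | _, _, [] => 0
  | p, r, c :: t =>
    let run : Int := if some c = p then r + 1 else 1
    run ⊔ mrun (some c) run t

lemma mrun_nonneg (p : Option Char) (r : Int) (t : List Char) : 0 ≤ mrun p r t := by
  induction t generalizing p r with
  | nil => simp [mrun]
  | cons c t ih =>
    simp only [mrun]
    exact le_trans (ih (some c) _) le_sup_right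

-- B's foldl = mrun
lemma foldl_step_eq_mrun (t : List Char) (p : Option Char) (b r : Int) (hb : 0 ≤ b) :
    (t.foldl (fun (st : Int × Int × Option Char) c =>
      let run : Int := if some c = st.2.2 then st.2.1 + 1 else 1
      let best : Int := if run > st.1 then run else st.1
      (best, run, some c)) (b, r, p)).1 = b ⊔ mrun p r t := by
  induction t generalizing p b r with
  | nil => simp [mrun]; omega
  | cons c t ih =>
    simp only [List.foldl_cons, mrun]
    set run : Int := if some c = p then r + 1 else 1 with hrun
    have hbest : (if run > b then run else b) = b ⊔ run := by
      simp [max_def]; omega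
    rw [hbest, ih (some c) (b ⊔ run) run (le_trans hb le_sup_left)]
    rw [sup_assoc]

-- the max character frequency of t, as A computes it (max over the distinct characters)
def MC (t : List Char) : Int :=
  ((PySem.Set.ofList t).map (fun c => ((t.count c : Nat) : Int))).foldl max 0

lemma MC_nonneg (t : List Char) : 0 ≤ MC t :=
  (PySem.List.le_foldl_max _ 0).1

lemma count_le_MC (t : List Char) (x : Char) (hx : x ∈ t) : ((t.count x : Nat) : Int) ≤ MC t :=
  (PySem.List.le_foldl_max _ 0).2 _
    (List.mem_map_of_mem ((PySem.Set.mem_ofList t x).mpr hx))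

lemma MC_cases (t : List Char) : MC t = 0 ∨ ∃ x ∈ t, MC t = ((t.count x : Nat) : Int) := by
  rcases PySem.List.foldl_max_mem ((PySem.Set.ofList t).map (fun c => ((t.count c : Nat) : Int))) 0 with h | h
  · exact Or.inl h
  · rcases List.mem_map.mp h with ⟨x, hx, hfx⟩
    exact Or.inr ⟨x, (PySem.Set.mem_ofList t x).mp hx, hfx.symm⟩

-- a sorted list starts with the full block of its head
lemma sorted_head_decomp : ∀ (t : List Char) (c : Char), (∀ x ∈ t, c ≤ x) → t.Pairwise (· ≤ ·) →
    ∃ rest, t = List.replicate (t.count c) c ++ rest ∧ c ∉ rest ∧ rest.Pairwise (· ≤ ·) := by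
  intro t
  induction t with
  | nil => intro c _ _; exact ⟨[], by simp, by simp, List.Pairwise.nil⟩
  | cons d t ih =>
    intro c hge hsort
    rcases List.pairwise_cons.mp hsort with ⟨hd, hts⟩
    by_cases hdc : d = c
    · subst hdc
      obtain ⟨rest, heq, hnot, hsr⟩ := ih d hd hts
      refine ⟨rest, ?_, hnot, hsr⟩
      rw [List.count_cons_self, List.replicate_succ, List.cons_append, ← heq]
    · have hcnot : c ∉ d :: t := by
        intro hmem
        rcases List.mem_cons.mp hmem with h | h
        · exact hdc h.symm
        · exact hdc (le_antisymm (hd c h) (hge d List.mem_cons_self))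
      refine ⟨d :: t, ?_, hcnot, hsort⟩
      rw [List.count_eq_zero.mpr hcnot]; simp

-- running through a block of k copies of c, with no c afterwards
lemma mrun_block (c : Char) (rest : List Char) (hc : c ∉ rest) :
    ∀ (k : Nat) (r : Int), mrun (some c) r (List.replicate k c ++ rest) ⊔ r
      = (r + k) ⊔ mrun none 0 rest := by
  intro k
  induction k with
  | zero =>
    intro r
    have hfresh : mrun (some c) r rest = mrun none 0 rest := by
      cases rest with
      | nil => simp [mrun]
      | cons d u =>
        have hdc : ¬ some d = some c := by
          simp only [Option.some.injEq]; rintro rfl; exact hc List.mem_cons_self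
        simp only [mrun]
        rw [if_neg hdc, if_neg (by simp)]
    rw [List.replicate_zero, List.nil_append, hfresh]
    have := mrun_nonneg none 0 rest
    push_cast
    omega
  | succ k ih =>
    intro r
    simp only [List.replicate_succ, List.cons_append, mrun, if_pos]
    have h := ih (r + 1)
    have h2 := mrun_nonneg (some c) (r + 1) (List.replicate k c ++ rest)
    push_cast at h ⊢
    omega

lemma MC_block (c : Char) (rest : List Char) (K : Nat) (hK : 1 ≤ K) (hc : c ∉ rest) :
    MC (List.replicate K c ++ rest) = (K : Int) ⊔ MC rest := by
  have hmemc : c ∈ List.replicate K c ++ rest := by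
    exact List.mem_append_left _ (List.mem_replicate.mpr ⟨by omega, rfl⟩)
  have hcc : (List.replicate K c ++ rest).count c = K := by
    rw [List.count_append, List.count_replicate, List.count_eq_zero.mpr hc]
    simp
  have hKA : (K : Int) ≤ MC (List.replicate K c ++ rest) := by
    have := count_le_MC _ c hmemc
    rwa [hcc] at this
  have hBA : MC rest ≤ MC (List.replicate K c ++ rest) := by
    rcases MC_cases rest with h | ⟨x, hx, hAx⟩
    · rw [h]; exact MC_nonneg _
    · have hxne : x ≠ c := fun h => hc (h ▸ hx)
      have hcx : (List.replicate K c ++ rest).count x = rest.count x := by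
        simp [List.count_append, List.count_replicate, Ne.symm hxne]
      have := count_le_MC (List.replicate K c ++ rest) x (List.mem_append_right _ hx)
      rw [hcx] at this
      rw [hAx]; exact this
  have hup : MC (List.replicate K c ++ rest) ≤ (K : Int) ⊔ MC rest := by
    rcases MC_cases (List.replicate K c ++ rest) with h | ⟨x, hx, hAx⟩
    · rw [h]; have := MC_nonneg rest; omega
    · rcases List.mem_append.mp hx with h | h
      · have : x = c := (List.mem_replicate.mp h).2
        subst this
        rw [hAx, hcc]; exact le_sup_left
      · have hxne : x ≠ c := fun hh => hc (hh ▸ h)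
        have hcx : (List.replicate K c ++ rest).count x = rest.count x := by
          simp [List.count_append, List.count_replicate, Ne.symm hxne]
        rw [hAx, hcx]
        exact le_trans (count_le_MC rest x h) le_sup_right
  omega

lemma mrun_sorted_eq_MC : ∀ (n : Nat) (t : List Char), t.length ≤ n → t.Pairwise (· ≤ ·) →
    mrun none 0 t = MC t := by
  intro n
  induction n with
  | zero =>
    intro t hlen _
    have : t = [] := List.length_eq_zero_iff.mp (Nat.le_zero.mp hlen)
    subst this; rfl
  | succ n ih =>
    intro t hlen hsort
    cases t with
    | nil => rfl
    | cons c t' =>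
      have hall : ∀ x ∈ c :: t', c ≤ x := by
        intro x hx
        rcases List.mem_cons.mp hx with h | h
        · exact h ▸ le_refl c
        · exact (List.pairwise_cons.mp hsort).1 x h
      obtain ⟨rest, heq, hcrest, hrsort⟩ := sorted_head_decomp (c :: t') c hall hsort
      have hKpos : 0 < (c :: t').count c := List.count_pos_iff.mpr List.mem_cons_self
      obtain ⟨K', hKeq⟩ : ∃ K', (c :: t').count c = K' + 1 := ⟨(c :: t').count c - 1, by omega⟩
      rw [hKeq] at heq
      have hlenr : rest.length ≤ n := by
        have := congrArg List.length heq
        simp [List.length_replicate] at this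
        simp at hlen
        omega
      have hrest_eq := ih rest hlenr hrsort
      rw [heq, MC_block c rest (K' + 1) (by omega) hcrest]
      rw [List.replicate_succ, List.cons_append]
      simp only [mrun]
      rw [if_neg (by simp)]
      have hb := mrun_block c rest hcrest K' 1
      rw [hrest_eq] at hb
      have hnn := mrun_nonneg (some c) 1 (List.replicate K' c ++ rest)
      have hMCnn := MC_nonneg rest
      push_cast at hb ⊢
      omega

-- ===== VERDICT (by name: the statement is the Claim_ definition above) =====
theorem longest_uniform_substring_spec : Claim_equal_longest_uniform_substring := by
  intro s _ hpre
  have hl : s.toList ≠ [] := fun h => hpre (String.toList_eq_nil_iff.mp h)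
  -- A's value: max? over the distinct-character counts
  have hA : longest_uniform_substring s
      = (PySem.List.max? ((PySem.Set.ofList s.toList).map (fun c => ((s.toList.count c : Nat) : Int))) (fun v => v)).getD 0 := by
    unfold longest_uniform_substring
    have hitems := PySem.Dict.items_counter (xs := s.toList)
    simp only [foldl_branch_eq_counter, PySem.Dict.values, hitems, List.map_map]
    rfl
  -- B's value: mrun over the sorted characters
  have hB : longest_uniform_substring_alt s
      = mrun none 0 (PySem.List.sorted s.toList (fun c => c) false) := by
    unfold longest_uniform_substring_alt
    rw [foldl_step_eq_mrun _ none 0 0 le_rfl]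
    have := mrun_nonneg none 0 (PySem.List.sorted s.toList (fun c => c) false)
    omega
  have hperm : (PySem.List.sorted s.toList (fun c => c) false).Perm s.toList :=
    PySem.List.sorted_perm s.toList (fun c => c) false
  have hpair : (PySem.List.sorted s.toList (fun c => c) false).Pairwise (· ≤ ·) := by
    simpa using PySem.List.sorted_pairwise s.toList (fun c => c)
  have hmc : mrun none 0 (PySem.List.sorted s.toList (fun c => c) false)
      = MC (PySem.List.sorted s.toList (fun c => c) false) :=
    mrun_sorted_eq_MC _ _ le_rfl hpair
  -- the max? of the counts equals MC of the sorted list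
  have hvs : (PySem.Set.ofList s.toList).map (fun c => ((s.toList.count c : Nat) : Int)) ≠ [] := by
    rcases List.exists_mem_of_ne_nil _ hl with ⟨x, hx⟩
    intro h
    have hmem : ((s.toList.count x : Nat) : Int)
        ∈ (PySem.Set.ofList s.toList).map (fun c => ((s.toList.count c : Nat) : Int)) :=
      List.mem_map_of_mem ((PySem.Set.mem_ofList s.toList x).mpr hx)
    rw [h] at hmem
    exact List.not_mem_nil hmem
  obtain ⟨m, hm⟩ : ∃ m, PySem.List.max? ((PySem.Set.ofList s.toList).map (fun c => ((s.toList.count c : Nat) : Int))) (fun v => v) = some m := by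
    cases h : PySem.List.max? ((PySem.Set.ofList s.toList).map (fun c => ((s.toList.count c : Nat) : Int))) (fun v => v) with
    | none => exact absurd ((PySem.List.max?_eq_none_iff _ _).mp h) hvs
    | some m => exact ⟨m, rfl⟩
  have hmmem := PySem.List.max?_mem hm
  have hmmax := PySem.List.max?_isMax hm
  have h1 : m ≤ MC (PySem.List.sorted s.toList (fun c => c) false) := by
    rcases List.mem_map.mp hmmem with ⟨x, hx, hfx⟩
    have hxl : x ∈ s.toList := (PySem.Set.mem_ofList s.toList x).mp hx
    have hxt : x ∈ PySem.List.sorted s.toList (fun c => c) false := hperm.mem_iff.mpr hxl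
    have hcnt : (PySem.List.sorted s.toList (fun c => c) false).count x = s.toList.count x :=
      hperm.count_eq x
    have := count_le_MC (PySem.List.sorted s.toList (fun c => c) false) x hxt
    rw [hcnt] at this
    rw [← hfx]; exact this
  have h2 : MC (PySem.List.sorted s.toList (fun c => c) false) ≤ m := by
    have hm0 : 0 ≤ m := by
      rcases List.mem_map.mp hmmem with ⟨x, _, hfx⟩
      rw [← hfx]; positivity
    rcases MC_cases (PySem.List.sorted s.toList (fun c => c) false) with h | ⟨x, hx, hAx⟩
    · rw [h]; exact hm0
    · have hxl : x ∈ s.toList := hperm.mem_iff.mp hx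
      have hcnt : (PySem.List.sorted s.toList (fun c => c) false).count x = s.toList.count x :=
        hperm.count_eq x
      rw [hAx, hcnt]
      exact hmmax _ (List.mem_map_of_mem ((PySem.Set.mem_ofList s.toList x).mpr hxl))
  unfold Spec_longest_uniform_substring
  rw [hA, hB, hm, hmc]
  simp only [Option.getD_some]
  omega
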